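-- pv_equiv track=rewrite | github.com/lazaropaul/inteligencia_practica01 | problems/nqueens.py | compute
-- ===== SOURCE A (Python) =====
-- def compute(state):
--     # Contem els conflictes per direcció
--     col_conflicts = 0
--     diag1_conflicts = 0
--     diag2_conflicts = 0
--
--     # Diccionari, contem quantes reines hi ha en cada columna
--     col_counts = {}
--     for col in state:
--         # Ex: {1: 2, 0: 1, 2: 1}
--         col_counts[col] = col_counts.get(col, 0) + 1
--
--     for count in col_counts.values(): # Si una columna te N reines en conflicte, hem de moure n-1
--         if count > 1:
--             # Column 1 te 2 reines -> conflicts += (2-1) = 1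
--             col_conflicts += count - 1
--
--     # Diagonal conflicts
--     diag1_counts = {}
--     diag2_counts = {}
--
--     # Les cel·les que tenen el mateix resultat en el calcul vol dir que estan a la mateixa diag
--     # Row 0, Col 0: d1 = 0-0 = 0
--     # Row 3, Col 3: d1 = 3-3 = 0
--     for row in range(len(state)):
--         col = state[row]
--         d1 = row - col
--         d2 = row + col
--         diag1_counts[d1] = diag1_counts.get(d1, 0) + 1
--         diag2_counts[d2] = diag2_counts.get(d2, 0) + 1
--
--     for count in diag1_counts.values():
--         if count > 1:
--             diag1_conflicts += count - 1
--
--     for count in diag2_counts.values():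
--         if count > 1:
--             diag2_conflicts += count - 1
--
--     # Retornem el maxim, fem admissible (no sobreestima) i "tighter" el bound
--     return max(col_conflicts, diag1_conflicts, diag2_conflicts)
-- ===== SOURCE B (Python) =====
-- def compute(state):
--     # B: sort each direction's key list, then count adjacent duplicates in one scan.
--     def conflicts(keys):
--         ks = sorted(keys)
--         return sum(1 for a, b in zip(ks, ks[1:]) if a == b)
--     return max(conflicts(state),
--                conflicts([r - c for r, c in enumerate(state)]),
--                conflicts([r + c for r, c in enumerate(state)]))
-- ===== Notes on version B (the rewrite author's own statement) =====
-- stated objective: alternative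
-- what changed: Replaces A's hash-counting (three count-dictionaries plus conditional value-summation loops) with a sort-based algorithm: build each direction's key list, sort it, and count adjacent equal pairs in one scan (for a sorted list, adjacent duplicates = sum over groups of (count-1)).
import Mathlib
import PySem

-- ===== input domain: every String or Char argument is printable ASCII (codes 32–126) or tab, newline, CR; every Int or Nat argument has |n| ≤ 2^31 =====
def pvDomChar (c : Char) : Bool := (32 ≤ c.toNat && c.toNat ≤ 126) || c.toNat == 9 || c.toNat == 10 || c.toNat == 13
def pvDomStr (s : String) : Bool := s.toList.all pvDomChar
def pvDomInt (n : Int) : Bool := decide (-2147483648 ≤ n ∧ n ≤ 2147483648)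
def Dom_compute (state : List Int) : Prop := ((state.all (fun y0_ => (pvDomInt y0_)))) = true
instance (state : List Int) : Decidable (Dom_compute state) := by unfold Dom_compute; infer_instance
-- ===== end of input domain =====

-- B replaces A's count-dictionaries and conditional value-summation loops with sort-then-scan: sort each direction's key list and count adjacent equal pairs (alternative algorithm, same results).

-- ===== PORT A =====
def compute (state : List Int) : Int :=
  -- col_counts[col] = col_counts.get(col, 0) + 1
  let col_counts : PySem.Dict Int Int :=
    state.foldl (fun d col => d.insert col (d.getD col 0 + 1)) PySem.Dict.empty
  let col_conflicts : Int :=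
    col_counts.values.foldl (fun acc count => if count > 1 then acc + (count - 1) else acc) 0
  -- one loop over range(len(state)) building both diagonal dicts
  let dd : PySem.Dict Int Int × PySem.Dict Int Int :=
    (PySem.List.pyRange 0 (state.length : Int) 1).foldl
      (fun dd row =>
        let col := PySem.List.pyGetD state row 0  -- state[row]; row always in range here
        let d1 := row - col
        let d2 := row + col
        (dd.1.insert d1 (dd.1.getD d1 0 + 1), dd.2.insert d2 (dd.2.getD d2 0 + 1)))
      (PySem.Dict.empty, PySem.Dict.empty)
  let diag1_conflicts : Int :=
    dd.1.values.foldl (fun acc count => if count > 1 then acc + (count - 1) else acc) 0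
  let diag2_conflicts : Int :=
    dd.2.values.foldl (fun acc count => if count > 1 then acc + (count - 1) else acc) 0
  max (max col_conflicts diag1_conflicts) diag2_conflicts

-- ===== PORT B =====
-- conflicts(keys): ks = sorted(keys); sum(1 for a, b in zip(ks, ks[1:]) if a == b)
def bConflicts (keys : List Int) : Int :=
  let ks := PySem.List.sorted keys (fun x => x) false
  (ks.zip (PySem.List.slice ks (some 1) none)).foldl
    (fun acc p => if p.1 == p.2 then acc + 1 else acc) 0

def compute_alt (state : List Int) : Int :=
  max (max (bConflicts state)
        (bConflicts ((PySem.List.enumerate state).map (fun p => p.1 - p.2))))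
      (bConflicts ((PySem.List.enumerate state).map (fun p => p.1 + p.2)))

-- ===== PRECONDITION & SPEC =====
def Spec_compute (state : List Int) (out : Int) : Prop := out = compute_alt state
instance (state : List Int) (out : Int) : Decidable (Spec_compute state out) := by unfold Spec_compute; infer_instance

-- ===== CLAIM (what is proved, stated in full; the proofs are below) =====
def Claim_equal_compute : Prop := ∀ (state : List Int), Dom_compute state → Spec_compute state (compute state)

-- ===== LEMMAS AND PROOFS =====

-- A-SIDE: the conflict-summing fold, on a list of values all ≥ 1, is acc + sum - length
lemma foldl_conf (l : List Int) (h : ∀ c ∈ l, 1 ≤ c) (acc : Int) :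
    l.foldl (fun acc count => if count > 1 then acc + (count - 1) else acc) acc
      = acc + l.sum - l.length := by
  induction l generalizing acc with
  | nil => simp
  | cons c t ih =>
    have hc : 1 ≤ c := h c (by simp)
    have ht : ∀ x ∈ t, 1 ≤ x := fun x hx => h x (by simp [hx])
    simp only [List.foldl_cons, List.sum_cons, List.length_cons]
    rw [ih ht]
    split_ifs with hgt <;> push_cast <;> omega

-- the 0/1 indicator sum is the count
lemma indicator_sum (l : List Int) (x : Int) :
    (l.map (fun k => if k = x then (1 : Int) else 0)).sum = (l.count x : Int) := by
  induction l with
  | nil => simp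
  | cons a s ih =>
    simp only [List.map_cons, List.sum_cons, List.count_cons, ih]
    by_cases hax : a = x
    · subst hax; simp; ring
    · have hb : (x == a) = false := by simp; exact fun h => hax h.symm
      simp [hax]

-- sum of the multiplicities of xs over any nodup list containing all of xs's elements
lemma sum_counts (l xs : List Int) (hnd : l.Nodup) (hmem : ∀ x ∈ xs, x ∈ l) :
    (l.map (fun k => (xs.count k : Int))).sum = xs.length := by
  induction xs with
  | nil => simp
  | cons x t ih =>
    have hx : x ∈ l := hmem x (by simp)
    have hmt : ∀ y ∈ t, y ∈ l := fun y hy => hmem y (by simp [hy])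
    have hsplit :
        (l.map (fun k => ((x :: t).count k : Int))).sum
          = (l.map (fun k => (t.count k : Int))).sum
            + (l.map (fun k => if k = x then (1 : Int) else 0)).sum := by
      rw [← List.sum_map_add]
      apply congrArg
      apply List.map_congr_left
      intro k _
      rw [List.count_cons]
      by_cases hkx : k = x
      · subst hkx; simp
      · simp [hkx]
        exact fun h => hkx h.symm
    rw [hsplit, ih hmt, indicator_sum, List.count_eq_one_of_mem hnd hx]
    simp only [List.length_cons]
    push_cast
    ring

-- A's summed (count-1) over a counter's values equals n minus the number of distinct elements
lemma conf_eq (xs : List Int) :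
    (PySem.Dict.counter xs).values.foldl
        (fun acc count => if count > 1 then acc + (count - 1) else acc) 0
      = (xs.length : Int) - (PySem.Set.ofList xs).length := by
  have hvals : (PySem.Dict.counter xs).values
      = (PySem.Set.ofList xs).map (fun k => (xs.count k : Int)) := by
    show ((PySem.Dict.counter xs).items.map (·.2)) = _
    rw [PySem.Dict.items_counter]
    simp [List.map_map, Function.comp]
  rw [hvals]
  have hge : ∀ c ∈ (PySem.Set.ofList xs).map (fun k => (xs.count k : Int)), 1 ≤ c := by
    intro c hc
    obtain ⟨k, hk, rfl⟩ := List.mem_map.mp hc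
    have : k ∈ xs := (PySem.Set.mem_ofList _ _).mp hk
    have : 0 < xs.count k := List.count_pos_iff.mpr this
    omega
  rw [foldl_conf _ hge 0,
      sum_counts (PySem.Set.ofList xs) xs (PySem.Set.nodup_ofList xs)
        (fun x hx => (PySem.Set.mem_ofList _ _).mpr hx)]
  simp [List.length_map]

-- the paired diagonal fold is the pair of the two single-dict folds
lemma pair_foldl (l : List Int) (f g : Int → Int)
    (d1 d2 : PySem.Dict Int Int) :
    l.foldl (fun dd row =>
        (dd.1.insert (f row) (dd.1.getD (f row) 0 + 1),
         dd.2.insert (g row) (dd.2.getD (g row) 0 + 1))) (d1, d2)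
      = (l.foldl (fun d row => d.insert (f row) (d.getD (f row) 0 + 1)) d1,
         l.foldl (fun d row => d.insert (g row) (d.getD (g row) 0 + 1)) d2) := by
  induction l generalizing d1 d2 with
  | nil => rfl
  | cons a t ih => simp only [List.foldl_cons]; exact ih _ _

-- a getD+1 insert fold keyed through f is the counter of the mapped list
lemma foldl_insert_key (l : List Int) (f : Int → Int) :
    l.foldl (fun d row => d.insert (f row) (d.getD (f row) 0 + 1)) PySem.Dict.empty
      = PySem.Dict.counter (l.map f) := by
  rw [← PySem.Dict.foldl_insert_getD_add_one_eq_counter, List.foldl_map]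

-- the number of distinct elements, as PySem.Set length or Finset card
lemma setLen_eq_card (xs : List Int) : ((PySem.Set.ofList xs).length : Int) = xs.toFinset.card := by
  rw [← List.toFinset_card_of_nodup (PySem.Set.nodup_ofList xs)]
  congr 2
  apply Finset.ext
  intro a
  simp [List.mem_toFinset, PySem.Set.mem_ofList]

-- B-SIDE: in a ≤-sorted list, the number of adjacent equal pairs is length minus distinct count
lemma adjcount (l : List Int) (h : l.Pairwise (· ≤ ·)) :
    ((List.countP (fun p => p.1 == p.2) (l.zip l.tail) : Nat) : Int)
      = (l.length : Int) - l.toFinset.card := by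
  induction l with
  | nil => simp
  | cons a t ih =>
    cases t with
    | nil => simp
    | cons b u =>
      have hab : a ≤ b := (List.pairwise_cons.mp h).1 b (by simp)
      have hpt : (b :: u).Pairwise (· ≤ ·) := (List.pairwise_cons.mp h).2
      have ihv := ih hpt
      have hcard := List.toFinset_card_le (b :: u)
      simp only [List.tail_cons, List.zip_cons_cons, List.countP_cons, List.toFinset_cons,
        List.length_cons] at *
      by_cases hEq : a = b
      · subst hEq
        rw [Finset.insert_idem]
        simp only [BEq.rfl]
        push_cast
        omega
      · have hnot : a ∉ insert b u.toFinset := by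
          simp only [Finset.mem_insert, List.mem_toFinset]
          rintro (rfl | hu)
          · exact hEq rfl
          · have : b ≤ a := (List.pairwise_cons.mp hpt).1 a hu
            exact hEq (le_antisymm hab this)
        rw [Finset.card_insert_of_notMem hnot]
        have hb : ((a, b).1 == (a, b).2) = false := by simp [hEq]
        rw [hb]
        push_cast
        omega

-- B's sort-and-scan conflicts equal n minus the number of distinct keys
lemma bConflicts_eq (xs : List Int) :
    bConflicts xs = (xs.length : Int) - (PySem.Set.ofList xs).length := by
  show (((PySem.List.sorted xs (fun x => x) false).zip
      (PySem.List.slice (PySem.List.sorted xs (fun x => x) false) (some 1) none)).foldl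
      (fun acc p => if p.1 == p.2 then acc + 1 else acc) 0)
    = (xs.length : Int) - (PySem.Set.ofList xs).length
  rw [PySem.List.slice_from_one, PySem.List.foldl_count_if, zero_add,
    adjcount _ (PySem.List.sorted_pairwise xs (fun x => x)),
    List.toFinset_eq_of_perm _ _ (PySem.List.sorted_perm xs (fun x => x) false),
    (PySem.List.sorted_perm xs (fun x => x) false).length_eq, setLen_eq_card]

-- ===== VERDICT (by name: the statement is the Claim_ definition above) =====
theorem compute_spec : Claim_equal_compute := by
  intro state _
  show compute state = compute_alt state
  unfold compute compute_alt
  simp only [PySem.Dict.foldl_insert_getD_add_one_eq_counter,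
    pair_foldl, foldl_insert_key, conf_eq, bConflicts_eq,
    PySem.List.enumerate_eq_map_pyRange state 0, List.map_map]
  rfl
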